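-- pv_equiv track=rewrite | github.com/TxusLopez/CURIE | curie_def.py | get_neighbourhood
-- ===== SOURCE A (Python) =====
-- def get_neighbourhood(matrix, coordinates, distance):
--
--     dimensions = len(coordinates)
--     neigh = []
--     app = neigh.append
--
--     def recc_von_neumann(arr, curr_dim=0, remaining_distance=distance, isCenter=True):
--         #the breaking statement of the recursion
--         if curr_dim == dimensions:
--             if not isCenter:
--                 app(arr)
--             return
--
--         dimensions_coordinate = coordinates[curr_dim]
--         if not (0 <= dimensions_coordinate < len(arr)):
--             return
--
--         dimesion_span = range(dimensions_coordinate - remaining_distance,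
--                               dimensions_coordinate + remaining_distance + 1)
--
--         for c in dimesion_span:
--             if 0 <= c < len(arr):
--                 recc_von_neumann(arr[c],
--                                  curr_dim + 1,
--                                  remaining_distance - abs(dimensions_coordinate - c),
--                                  isCenter and dimensions_coordinate == c)
--         return
--
--     recc_von_neumann(matrix)
--     return neigh
-- ===== SOURCE B (Python) =====
-- # Level-synchronous (breadth-first) re-implementation: instead of recursing per cell,
-- # keep one list of live frames per dimension and expand all of them one coordinate at a time.
-- def _expand(coord, frame):
--     arr, rem, center = frame
--     children = []
--     if 0 <= coord < len(arr):
--         for c in range(coord - rem, coord + rem + 1):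
--             if 0 <= c < len(arr):
--                 children.append((arr[c], rem - abs(coord - c), center and coord == c))
--     return children
--
-- def get_neighbourhood(matrix, coordinates, distance):
--     frames = [(matrix, distance, True)]
--     for coord in coordinates:
--         nxt = []
--         for fr in frames:
--             nxt.extend(_expand(coord, fr))
--         frames = nxt
--     return [arr for arr, _, center in frames if not center]
-- ===== Notes on version B (the rewrite author's own statement) =====
-- stated objective: alternative
-- what changed: Replaces A's depth-first nested recursion (one recursive call per cell, appending leaves as it backtracks) with a level-synchronous breadth-first sweep that expands a flat worklist of (arr, remaining, isCenter) frames one coordinate dimension at a time and collects the non-center survivors at the end; the lexicographic append order is preserved because each level expands frames in order.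
-- outside the precondition, e.g. on get_neighbourhood([[1, 2], [3, 4]], [0], 1): A returns [[3, 4]], B returns [[3, 4]]
import Mathlib
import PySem

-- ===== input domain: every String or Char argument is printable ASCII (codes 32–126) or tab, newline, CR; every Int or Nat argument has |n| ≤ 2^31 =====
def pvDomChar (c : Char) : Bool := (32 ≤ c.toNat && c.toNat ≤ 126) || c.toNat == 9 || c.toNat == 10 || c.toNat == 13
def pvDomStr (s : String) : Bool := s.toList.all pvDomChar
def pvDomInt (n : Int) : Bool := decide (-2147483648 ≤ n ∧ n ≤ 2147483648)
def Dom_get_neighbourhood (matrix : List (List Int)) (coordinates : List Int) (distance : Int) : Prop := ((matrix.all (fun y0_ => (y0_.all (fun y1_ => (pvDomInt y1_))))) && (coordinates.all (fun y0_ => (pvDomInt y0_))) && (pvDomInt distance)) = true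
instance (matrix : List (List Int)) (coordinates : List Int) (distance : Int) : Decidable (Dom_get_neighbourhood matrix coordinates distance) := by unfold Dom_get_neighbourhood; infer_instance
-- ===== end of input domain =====

-- B replaces A's depth-first recursion by a level-synchronous (breadth-first) sweep that
-- expands one flat list of live frames per coordinate dimension; objective: alternative decomposition.

-- ===== PORT A =====
-- A's single dynamically-typed recursive helper is transliterated as one typed function per
-- nesting level (matrix / row / scalar); each is the same Python code, step for step.

-- depth-2 call, arr is a scalar.  If dim ≠ dims the Python computes len() of an int and
-- raises TypeError: that branch is unreachable under Pre_ and returns [] here.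
def reccVal (dims : Nat) (x : Int) (dim : Nat) (_rem : Int) (center : Bool) : List Int :=
  if dim = dims then (if center then [] else [x]) else []

-- depth-1 call, arr is a row.  If dim = dims the Python would append the row itself (a list,
-- not an int, so outside the declared return type): unreachable under Pre_, [] here.
def reccRow (dims : Nat) (coords : List Int) (xs : List Int) (dim : Nat) (rem : Int)
    (center : Bool) : List Int :=
  if dim = dims then []
  else
    let coord := coords.getD dim 0
    if 0 ≤ coord ∧ coord < (xs.length : Int) then
      (PySem.List.pyRange (coord - rem) (coord + rem + 1) 1).foldl
        (fun acc c =>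
          if 0 ≤ c ∧ c < (xs.length : Int) then
            acc ++ reccVal dims ((PySem.List.pyGet? xs c).getD 0) (dim + 1)
                     (rem - |coord - c|) (center && (coord == c))
          else acc) []
    else []

-- depth-0 call, arr is the matrix (same remark as reccRow for the dim = dims branch).
def reccMat (dims : Nat) (coords : List Int) (m : List (List Int)) (dim : Nat) (rem : Int)
    (center : Bool) : List Int :=
  if dim = dims then []
  else
    let coord := coords.getD dim 0
    if 0 ≤ coord ∧ coord < (m.length : Int) then
      (PySem.List.pyRange (coord - rem) (coord + rem + 1) 1).foldl
        (fun acc c =>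
          if 0 ≤ c ∧ c < (m.length : Int) then
            acc ++ reccRow dims coords ((PySem.List.pyGet? m c).getD []) (dim + 1)
                     (rem - |coord - c|) (center && (coord == c))
          else acc) []
    else []

def get_neighbourhood (matrix : List (List Int)) (coordinates : List Int) (distance : Int) :
    List Int :=
  reccMat coordinates.length coordinates matrix 0 distance true

-- ===== PORT B =====
-- A frame is Python's (arr, remaining, isCenter) tuple; arr's dynamic type becomes PyCell.
inductive PyCell where
  | mat : List (List Int) → PyCell
  | row : List Int → PyCell
  | val : Int → PyCell
deriving DecidableEq, Repr

-- _expand(coord, frame).  On a scalar frame the Python computes len() of an int and raises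
-- (unreachable under Pre_): [] here.
def expandB (coord : Int) (fr : PyCell × Int × Bool) : List (PyCell × Int × Bool) :=
  match fr with
  | (PyCell.mat m, rem, center) =>
    if 0 ≤ coord ∧ coord < (m.length : Int) then
      (PySem.List.pyRange (coord - rem) (coord + rem + 1) 1).foldl
        (fun acc c =>
          if 0 ≤ c ∧ c < (m.length : Int) then
            acc ++ [(PyCell.row ((PySem.List.pyGet? m c).getD []), rem - |coord - c|,
                     center && (coord == c))]
          else acc) []
    else []
  | (PyCell.row xs, rem, center) =>
    if 0 ≤ coord ∧ coord < (xs.length : Int) then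
      (PySem.List.pyRange (coord - rem) (coord + rem + 1) 1).foldl
        (fun acc c =>
          if 0 ≤ c ∧ c < (xs.length : Int) then
            acc ++ [(PyCell.val ((PySem.List.pyGet? xs c).getD 0), rem - |coord - c|,
                     center && (coord == c))]
          else acc) []
    else []
  | (PyCell.val _, _, _) => []

-- the final comprehension '[arr for arr, _, center in frames if not center]'; a non-scalar
-- arr would leave the declared return type (unreachable under Pre_): dropped here.
def pickVal (fr : PyCell × Int × Bool) : Option Int :=
  if fr.2.2 then none
  else match fr.1 with
       | PyCell.val x => some x
       | _ => none

def get_neighbourhood_alt (matrix : List (List Int)) (coordinates : List Int)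
    (distance : Int) : List Int :=
  let frames := coordinates.foldl
    (fun fs coord => fs.foldl (fun nxt fr => nxt ++ expandB coord fr) [])
    [(PyCell.mat matrix, distance, true)]
  frames.filterMap pickVal

-- ===== PRECONDITION & SPEC =====
-- Pre_ excludes exactly the inputs where the Python A raises TypeError (len() of an int:
-- len(coordinates) ≥ 3 and the recursion reaches nesting depth 2) or where A returns a value
-- that is not of the declared list-of-ints type (len(coordinates) = 1 with a reachable
-- non-center index, where A returns a list of rows).
def Pre_get_neighbourhood (matrix : List (List Int)) (coordinates : List Int)
    (distance : Int) : Prop :=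
  let n : Int := matrix.length
  let c0 := coordinates.getD 0 0
  let c1 := coordinates.getD 1 0
  coordinates.length = 0 ∨ coordinates.length = 2
  ∨ (coordinates.length = 1 ∧
      (¬ (0 ≤ c0 ∧ c0 < n) ∨ distance < 0 ∨
        (max 0 (c0 - distance) = c0 ∧ min (n - 1) (c0 + distance) = c0)))
  ∨ (3 ≤ coordinates.length ∧
      (¬ (0 ≤ c0 ∧ c0 < n) ∨ distance < 0 ∨
        ∀ i ∈ List.range matrix.length,
          ¬ (c0 - distance ≤ (i : Int) ∧ (i : Int) ≤ c0 + distance ∧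
             0 ≤ c1 ∧ c1 < ((matrix.getD i []).length : Int))))

instance (matrix : List (List Int)) (coordinates : List Int) (distance : Int) :
    Decidable (Pre_get_neighbourhood matrix coordinates distance) := by
  unfold Pre_get_neighbourhood; infer_instance

def pvWitness_get_neighbourhood : List (List Int) × List Int × Int :=
  ([[1, 2], [3, 4]], [0, 1], 1)

def Spec_get_neighbourhood (matrix : List (List Int)) (coordinates : List Int) (distance : Int) (out : List Int) : Prop := out = get_neighbourhood_alt matrix coordinates distance
instance (matrix : List (List Int)) (coordinates : List Int) (distance : Int) (out : List Int) : Decidable (Spec_get_neighbourhood matrix coordinates distance out) := by unfold Spec_get_neighbourhood; infer_instance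

-- ===== CLAIM (what is proved, stated in full; the proofs are below) =====
def Claim_equal_get_neighbourhood : Prop := ∀ (matrix : List (List Int)) (coordinates : List Int) (distance : Int), Dom_get_neighbourhood matrix coordinates distance → Pre_get_neighbourhood matrix coordinates distance → Spec_get_neighbourhood matrix coordinates distance (get_neighbourhood matrix coordinates distance)

-- ===== LEMMAS AND PROOFS =====

-- the shared loop shape 'for c in range(...): if in_range(c): out += f(c)' as a flatMap
theorem foldl_ite_append_eq_flatMap {α β : Type} (P : β → Prop) [DecidablePred P]
    (g : β → List α) (l : List β) (acc : List α) :
    l.foldl (fun a c => if P c then a ++ g c else a) acc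
      = acc ++ l.flatMap (fun c => if P c then g c else []) := by
  induction l generalizing acc with
  | nil => simp
  | cons x xs ih => by_cases h : P x <;> simp [h, ih]

-- row-level agreement: A's depth-1 recursion = extracting B's expansion of a row frame
theorem row_eq (coords : List Int) (xs : List Int) (rem : Int) (center : Bool) :
    reccRow 2 coords xs 1 rem center
      = (expandB (coords.getD 1 0) (PyCell.row xs, rem, center)).filterMap pickVal := by
  simp only [reccRow, expandB]
  rw [if_neg (by norm_num : ¬(1 : Nat) = 2)]
  by_cases hg : 0 ≤ coords.getD 1 0 ∧ coords.getD 1 0 < (xs.length : Int)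
  · rw [if_pos hg, if_pos hg, foldl_ite_append_eq_flatMap, foldl_ite_append_eq_flatMap]
    simp only [List.nil_append]
    rw [List.filterMap_flatMap]
    congr 1
    funext c
    by_cases hc : 0 ≤ c ∧ c < (xs.length : Int)
    · rw [if_pos hc, if_pos hc]
      cases hb : (center && (coords.getD 1 0 == c)) <;> simp [reccVal, pickVal]
    · rw [if_neg hc, if_neg hc]; rfl
  · rw [if_neg hg, if_neg hg]; rfl

-- matrix-level agreement for the two-dimensional case
theorem mat_eq (coords : List Int) (m : List (List Int)) (d : Int) :
    reccMat 2 coords m 0 d true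
      = ((expandB (coords.getD 0 0) (PyCell.mat m, d, true)).flatMap
          (expandB (coords.getD 1 0))).filterMap pickVal := by
  simp only [reccMat, expandB]
  rw [if_neg (by norm_num : ¬(0 : Nat) = 2)]
  by_cases hg : 0 ≤ coords.getD 0 0 ∧ coords.getD 0 0 < (m.length : Int)
  · rw [if_pos hg, if_pos hg, foldl_ite_append_eq_flatMap, foldl_ite_append_eq_flatMap]
    simp only [List.nil_append]
    rw [List.flatMap_assoc, List.filterMap_flatMap]
    congr 1
    funext c
    by_cases hc : 0 ≤ c ∧ c < (m.length : Int)
    · rw [if_pos hc, if_pos hc]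
      simp only [List.flatMap_cons, List.flatMap_nil, List.append_nil]
      norm_num
      rw [row_eq]
      simp [List.getD_eq_getElem?_getD]
    · rw [if_neg hc, if_neg hc]; rfl
  · rw [if_neg hg, if_neg hg]; rfl

-- the inner frame loop 'for fr in frames: nxt.extend(_expand(coord, fr))' is a flatMap
theorem frames_foldl_eq_flatMap (coord : Int) (fs : List (PyCell × Int × Bool)) :
    fs.foldl (fun nxt fr => nxt ++ expandB coord fr) [] = fs.flatMap (expandB coord) := by
  simpa using PySem.List.foldl_append_eq_flatMap (expandB coord) fs []

-- once the frame list is empty it stays empty through the remaining dimensions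
theorem foldl_frames_nil (coords : List Int) :
    coords.foldl (fun fs coord => fs.flatMap (expandB coord))
      ([] : List (PyCell × Int × Bool)) = [] := by
  induction coords with
  | nil => rfl
  | cons c cs ih => simpa using ih

-- every frame produced from a matrix frame is a row frame
theorem expandB_mat_rows (coord : Int) (m : List (List Int)) (rem : Int) (center : Bool) :
    ∀ fr ∈ expandB coord (PyCell.mat m, rem, center), ∃ xs r b, fr = (PyCell.row xs, r, b) := by
  intro fr hfr
  simp only [expandB] at hfr
  split_ifs at hfr with hg
  · rw [foldl_ite_append_eq_flatMap] at hfr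
    simp only [List.nil_append, List.mem_flatMap] at hfr
    obtain ⟨c, -, hc⟩ := hfr
    split_ifs at hc
    · simp only [List.mem_singleton] at hc
      exact ⟨_, _, _, hc⟩
    · simp at hc
  · simp at hfr

-- every frame produced from a row frame is a scalar frame
theorem expandB_row_vals (coord : Int) (xs : List Int) (rem : Int) (center : Bool) :
    ∀ fr ∈ expandB coord (PyCell.row xs, rem, center), ∃ x r b, fr = (PyCell.val x, r, b) := by
  intro fr hfr
  simp only [expandB] at hfr
  split_ifs at hfr with hg
  · rw [foldl_ite_append_eq_flatMap] at hfr
    simp only [List.nil_append, List.mem_flatMap] at hfr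
    obtain ⟨c, -, hc⟩ := hfr
    split_ifs at hc
    · simp only [List.mem_singleton] at hc
      exact ⟨_, _, _, hc⟩
    · simp at hc
  · simp at hfr

-- row frames contribute nothing to the final comprehension
theorem filterMap_pickVal_rows (fs : List (PyCell × Int × Bool))
    (h : ∀ fr ∈ fs, ∃ xs r b, fr = (PyCell.row xs, r, b)) : fs.filterMap pickVal = [] := by
  induction fs with
  | nil => rfl
  | cons fr rest ih =>
    obtain ⟨xs, r, b, rfl⟩ := h _ (List.mem_cons_self)
    have hrest := ih fun fr hfr => h fr (List.mem_cons_of_mem _ hfr)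
    have hhd : pickVal (PyCell.row xs, r, b) = none := by cases b <;> rfl
    rw [List.filterMap_cons, hhd, hrest]

-- with three or more dimensions both ports return [] (A's port: the depth-2 branch where
-- the Python raises; B's port: the scalar frames expand to nothing)
theorem reccRow_ge3 (dims : Nat) (coords : List Int) (xs : List Int) (rem : Int)
    (center : Bool) (h : 3 ≤ dims) : reccRow dims coords xs 1 rem center = [] := by
  unfold reccRow
  rw [if_neg (by omega : ¬1 = dims)]
  by_cases hg : 0 ≤ coords.getD 1 0 ∧ coords.getD 1 0 < (xs.length : Int)
  · rw [if_pos hg, foldl_ite_append_eq_flatMap]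
    have : ¬(1 + 1 = dims) := by omega
    simp [reccVal, this]
  · rw [if_neg hg]

theorem reccMat_ge3 (dims : Nat) (coords : List Int) (m : List (List Int)) (d : Int)
    (h : 3 ≤ dims) : reccMat dims coords m 0 d true = [] := by
  unfold reccMat
  rw [if_neg (by omega : ¬0 = dims)]
  by_cases hg : 0 ≤ coords.getD 0 0 ∧ coords.getD 0 0 < (m.length : Int)
  · rw [if_pos hg, foldl_ite_append_eq_flatMap]
    simp [reccRow_ge3 dims coords _ _ _ h]
  · rw [if_neg hg]

-- unconditional agreement of the two ports (Pre_ is needed only on the Python side,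
-- where A can raise or return a non-int list; both ports return [] there)
theorem ports_agree (matrix : List (List Int)) (coordinates : List Int) (distance : Int) :
    get_neighbourhood matrix coordinates distance
      = get_neighbourhood_alt matrix coordinates distance := by
  match coordinates with
  | [] =>
    simp [get_neighbourhood, get_neighbourhood_alt, reccMat, pickVal]
  | [c0] =>
    have hA : get_neighbourhood matrix [c0] distance = [] := by
      simp only [get_neighbourhood, reccMat]
      split_ifs with h1 h2
      · rfl
      · rw [foldl_ite_append_eq_flatMap]
        simp [reccRow]
      · rfl
    have hB : get_neighbourhood_alt matrix [c0] distance = [] := by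
      simp only [get_neighbourhood_alt, List.foldl_cons, List.foldl_nil, List.nil_append]
      exact filterMap_pickVal_rows _ (expandB_mat_rows c0 matrix distance true)
    rw [hA, hB]
  | [c0, c1] =>
    simp only [get_neighbourhood, get_neighbourhood_alt, List.foldl_cons, List.foldl_nil,
      frames_foldl_eq_flatMap, List.flatMap_cons, List.flatMap_nil,
      List.append_nil]
    exact mat_eq [c0, c1] matrix distance
  | c0 :: c1 :: c2 :: rest =>
    have hA : get_neighbourhood matrix (c0 :: c1 :: c2 :: rest) distance = [] := by
      unfold get_neighbourhood
      exact reccMat_ge3 _ _ _ _ (by simp)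
    have hF2 : ∀ fr ∈ ((expandB c0 (PyCell.mat matrix, distance, true)).flatMap
        (expandB c1)), expandB c2 fr = [] := by
      intro fr hfr
      rw [List.mem_flatMap] at hfr
      obtain ⟨fr1, hfr1, hfr2⟩ := hfr
      obtain ⟨xs, r, b, rfl⟩ := expandB_mat_rows c0 matrix distance true fr1 hfr1
      obtain ⟨x, r2, b2, rfl⟩ := expandB_row_vals c1 xs r b fr hfr2
      rfl
    have hB : get_neighbourhood_alt matrix (c0 :: c1 :: c2 :: rest) distance = [] := by
      simp only [get_neighbourhood_alt, List.foldl_cons,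
        frames_foldl_eq_flatMap, List.flatMap_cons, List.flatMap_nil, List.append_nil]
      rw [List.flatMap_eq_nil_iff.mpr hF2, foldl_frames_nil]
      rfl
    rw [hA, hB]

-- ===== VERDICT (by name: the statement is the Claim_ definition above) =====
theorem get_neighbourhood_spec : Claim_equal_get_neighbourhood := by
  intro matrix coordinates distance _ _
  unfold Spec_get_neighbourhood
  exact ports_agree matrix coordinates distance
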